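-- pv_equiv track=rewrite | github.com/NeuberJone/Texpad | listforge_core.py | _decide_effective_json_import_fields
-- ===== SOURCE A (Python) =====
-- from typing import Any, List
--
-- JSON_IMPORT_FIELD_ORDER = [
--     "Name",
--     "Number",
--     "ShortSleeve",
--     "LongSleeve",
--     "Short",
--     "Pants",
--     "Tanktop",
--     "Vest",
--     "Nickname",
--     "BloodType",
-- ]
--
-- JSON_IMPORT_MANDATORY_FIELDS = {"Name", "Number"}
--
-- def _normalize_json_import_value(value: Any) -> str:
--     if value is None:
--         return ""
--     return str(value).replace("\r", "").replace("\n", " ").strip()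
--
-- def _decide_effective_json_import_fields(orders: list[dict[str, Any]]) -> list[str]:
--     present: set[str] = set()
--
--     for entry in orders:
--         for key in JSON_IMPORT_FIELD_ORDER:
--             if key in JSON_IMPORT_MANDATORY_FIELDS:
--                 continue
--             if _normalize_json_import_value(entry.get(key, "")):
--                 present.add(key)
--
--     return [
--         key
--         for key in JSON_IMPORT_FIELD_ORDER
--         if key in JSON_IMPORT_MANDATORY_FIELDS or key in present
--     ]
-- ===== SOURCE B (Python) =====
-- from typing import Any, List
--
-- JSON_IMPORT_FIELD_ORDER = [
--     "Name",
--     "Number",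
--     "ShortSleeve",
--     "LongSleeve",
--     "Short",
--     "Pants",
--     "Tanktop",
--     "Vest",
--     "Nickname",
--     "BloodType",
-- ]
--
-- JSON_IMPORT_MANDATORY_FIELDS = {"Name", "Number"}
--
-- def _normalize_json_import_value(value: Any) -> str:
--     if value is None:
--         return ""
--     return str(value).replace("\r", "").replace("\n", " ").strip()
--
-- def _used(key, orders):
--     # short-circuiting existence test over the entries
--     for entry in orders:
--         if _normalize_json_import_value(entry.get(key, "")):
--             return True
--     return False
--
-- def _build(fields, orders):
--     # recursion on the field order; no shared mutable state
--     if not fields: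
--         return []
--     key, *tail = fields
--     rest = _build(tail, orders)
--     if key in JSON_IMPORT_MANDATORY_FIELDS or _used(key, orders):
--         return [key] + rest
--     return rest
--
-- def _decide_effective_json_import_fields(orders: list) -> list:
--     return _build(JSON_IMPORT_FIELD_ORDER, orders)
-- ===== Notes on version B (the rewrite author's own statement) =====
-- stated objective: alternative
-- what changed: Replaces the entries-outer/fields-inner accumulation of a mutable 'present' set plus a second filtering pass by structural recursion: the result is built back-to-front by recursion on the field order, each optional field tested with a recursive short-circuiting existence scan over the entries.
import Mathlib
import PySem

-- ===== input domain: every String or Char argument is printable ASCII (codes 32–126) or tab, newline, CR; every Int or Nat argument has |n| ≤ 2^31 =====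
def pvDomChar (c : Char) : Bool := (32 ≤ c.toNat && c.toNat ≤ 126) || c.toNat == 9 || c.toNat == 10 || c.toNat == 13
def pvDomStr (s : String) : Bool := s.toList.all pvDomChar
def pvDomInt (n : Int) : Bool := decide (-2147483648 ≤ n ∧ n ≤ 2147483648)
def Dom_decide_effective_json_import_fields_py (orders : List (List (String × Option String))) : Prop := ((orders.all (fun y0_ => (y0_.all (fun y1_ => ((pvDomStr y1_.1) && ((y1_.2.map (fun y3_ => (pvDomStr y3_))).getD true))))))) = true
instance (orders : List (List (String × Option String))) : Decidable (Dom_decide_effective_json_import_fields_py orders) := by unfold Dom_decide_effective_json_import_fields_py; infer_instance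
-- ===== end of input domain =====

-- B replaces the mutable 'present' set and the two passes by structural recursion on the
-- field order with a recursive short-circuiting existence scan per optional field
-- (objective: alternative; same cost).

-- module-level constants and helper shared by A and B
def pvFieldOrder : List String :=
  ["Name", "Number", "ShortSleeve", "LongSleeve", "Short", "Pants", "Tanktop", "Vest", "Nickname", "BloodType"]

def pvMandatory : PySem.Set String := PySem.Set.ofList ["Name", "Number"]

-- _normalize_json_import_value (values here are Optional[str])
def pvNormalize (v : Option String) : String :=
  match v with
  | none => ""
  | some s => PySem.Str.strip (PySem.Str.replace (PySem.Str.replace s "\r" "") "\n" " ")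

-- _normalize_json_import_value(entry.get(key, ""))
def pvNormGet (entry : List (String × Option String)) (key : String) : String :=
  pvNormalize (((PySem.Dict.mk entry).get? key).getD (some ""))

-- ===== PORT A =====
def decide_effective_json_import_fields_py (orders : List (List (String × Option String))) : List String :=
  let present : PySem.Set String :=
    orders.foldl
      (fun present entry =>
        pvFieldOrder.foldl
          (fun present key =>
            if PySem.Set.contains pvMandatory key then present
            else if pvNormGet entry key ≠ "" then PySem.Set.add present key
            else present)
          present)
      PySem.Set.empty
  pvFieldOrder.filter (fun key => PySem.Set.contains pvMandatory key || PySem.Set.contains present key)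

-- ===== PORT B =====
-- _used(key, rest): recursive short-circuiting existence scan over the entries
def pvUsed (key : String) : List (List (String × Option String)) → Bool
  | [] => false
  | head :: tail => (pvNormGet head key != "") || pvUsed key tail

-- _build(fields, orders): recursion on the field order, building the result back-to-front
def pvBuild (orders : List (List (String × Option String))) : List String → List String
  | [] => []
  | key :: tail =>
      let rest := pvBuild orders tail
      if PySem.Set.contains pvMandatory key || pvUsed key orders then key :: rest else rest

def decide_effective_json_import_fields_py_alt (orders : List (List (String × Option String))) : List String :=
  pvBuild orders pvFieldOrder

-- ===== PRECONDITION & SPEC =====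
def Spec_decide_effective_json_import_fields_py (orders : List (List (String × Option String))) (out : List String) : Prop := out = decide_effective_json_import_fields_py_alt orders
instance (orders : List (List (String × Option String))) (out : List String) : Decidable (Spec_decide_effective_json_import_fields_py orders out) := by unfold Spec_decide_effective_json_import_fields_py; infer_instance

-- ===== CLAIM =====
def Claim_equal_decide_effective_json_import_fields_py : Prop := ∀ (orders : List (List (String × Option String))), Dom_decide_effective_json_import_fields_py orders → Spec_decide_effective_json_import_fields_py orders (decide_effective_json_import_fields_py orders)

-- ===== LEMMAS AND PROOFS =====

-- membership in the set built by A's inner loop over a field list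
theorem pv_mem_inner (entry : List (String × Option String)) :
    ∀ (ks : List String) (s : List String) (k : String),
      k ∈ ks.foldl
            (fun present key =>
              if PySem.Set.contains pvMandatory key then present
              else if pvNormGet entry key ≠ "" then PySem.Set.add present key
              else present) s
        ↔ k ∈ s ∨ (k ∈ ks ∧ PySem.Set.contains pvMandatory k = false ∧ pvNormGet entry k ≠ "") := by
  intro ks
  induction ks with
  | nil => simp
  | cons key ks ih =>
    intro s k
    simp only [List.foldl_cons, ih, List.mem_cons]
    by_cases hm : PySem.Set.contains pvMandatory key = true
    · rw [if_pos hm]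
      constructor
      · rintro (h | h)
        · exact Or.inl h
        · exact Or.inr ⟨Or.inr h.1, h.2.1, h.2.2⟩
      · rintro (h | ⟨(rfl | hk), h2, h3⟩)
        · exact Or.inl h
        · rw [hm] at h2; cases h2
        · exact Or.inr ⟨hk, h2, h3⟩
    · rw [if_neg hm]
      by_cases hn : pvNormGet entry key = ""
      · rw [if_neg (not_not_intro hn)]
        constructor
        · rintro (h | h)
          · exact Or.inl h
          · exact Or.inr ⟨Or.inr h.1, h.2.1, h.2.2⟩
        · rintro (h | ⟨(rfl | hk), h2, h3⟩)
          · exact Or.inl h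
          · exact absurd hn h3
          · exact Or.inr ⟨hk, h2, h3⟩
      · rw [if_pos hn]
        rw [PySem.Set.mem_add]
        constructor
        · rintro ((h | rfl) | h)
          · exact Or.inl h
          · exact Or.inr ⟨Or.inl rfl, Bool.eq_false_iff.mpr hm, hn⟩
          · exact Or.inr ⟨Or.inr h.1, h.2.1, h.2.2⟩
        · rintro (h | ⟨(rfl | hk), h2, h3⟩)
          · exact Or.inl (Or.inl h)
          · exact Or.inl (Or.inr rfl)
          · exact Or.inr ⟨hk, h2, h3⟩

-- membership in the set built by A's outer loop over the entries
theorem pv_mem_outer :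
    ∀ (os : List (List (String × Option String))) (s : List String) (k : String),
      k ∈ os.foldl
            (fun present entry =>
              pvFieldOrder.foldl
                (fun present key =>
                  if PySem.Set.contains pvMandatory key then present
                  else if pvNormGet entry key ≠ "" then PySem.Set.add present key
                  else present) present) s
        ↔ k ∈ s ∨ ∃ e ∈ os, k ∈ pvFieldOrder ∧ PySem.Set.contains pvMandatory k = false ∧ pvNormGet e k ≠ "" := by
  intro os
  induction os with
  | nil => simp
  | cons e os ih =>
    intro s k
    simp only [List.foldl_cons, ih, pv_mem_inner, List.mem_cons]
    constructor
    · rintro ((h | h) | ⟨e', he', h'⟩)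
      · exact Or.inl h
      · exact Or.inr ⟨e, Or.inl rfl, h⟩
      · exact Or.inr ⟨e', Or.inr he', h'⟩
    · rintro (h | ⟨e', (rfl | he'), h'⟩)
      · exact Or.inl (Or.inl h)
      · exact Or.inl (Or.inr h')
      · exact Or.inr ⟨e', he', h'⟩

-- B's recursive existence scan is the existential over the entries
theorem pvUsed_iff (k : String) :
    ∀ (os : List (List (String × Option String))),
      pvUsed k os = true ↔ ∃ e ∈ os, pvNormGet e k ≠ "" := by
  intro os
  induction os with
  | nil => simp [pvUsed]
  | cons e os ih => simp [pvUsed, ih, bne_iff_ne]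

-- B's recursive builder is a filter of the field list
theorem pvBuild_eq_filter (orders : List (List (String × Option String))) :
    ∀ (ks : List String),
      pvBuild orders ks = ks.filter (fun key => PySem.Set.contains pvMandatory key || pvUsed key orders) := by
  intro ks
  induction ks with
  | nil => rfl
  | cons key ks ih =>
    simp only [pvBuild, ih, List.filter_cons]

-- ===== VERDICT =====
theorem decide_effective_json_import_fields_py_spec : Claim_equal_decide_effective_json_import_fields_py := by
  intro orders _
  unfold Spec_decide_effective_json_import_fields_py
  simp only [decide_effective_json_import_fields_py, decide_effective_json_import_fields_py_alt,
    pvBuild_eq_filter]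
  apply List.filter_congr
  intro key hkey
  by_cases hm : PySem.Set.contains pvMandatory key = true
  · rw [hm, Bool.true_or, Bool.true_or]
  · rw [Bool.eq_false_iff.mpr hm, Bool.false_or, Bool.false_or,
      Bool.eq_iff_iff, PySem.Set.contains_iff, pvUsed_iff, pv_mem_outer]
    constructor
    · rintro (h | ⟨e, he, _, _, hn⟩)
      · simp [PySem.Set.empty] at h
      · exact ⟨e, he, hn⟩
    · rintro ⟨e, he, hn⟩
      exact Or.inr ⟨e, he, hkey, Bool.eq_false_iff.mpr hm, hn⟩
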